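-- pv_equiv track=rewrite | github.com/raulbaciulescu/university | first-year/first-semester/AP/Seminar/sem2/subsecv_max.py | get_longest_sublist_all_even
-- ===== SOURCE A (Python) =====
-- def all_even(lst):
--     '''
--     Determina daca o lista este formata doar din elemente pare.
--     :param lst: lista data.
--     :return: True daca lst are doar elemente pare si False altfel
--     '''
--     for num in lst:
--         if num % 2 != 0:
--             return False
--     return True
--
-- def get_longest_sublist_all_even(lst):
--     '''
--     Calculeaza prime cea mai lunga subsecv cu toate numerele pare.
--     :param lst: lista data
--     :return: O lista reprezentand subsecv ceruta.
--     '''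
--
--     # [1, 100, 3, 5, 20, 1, 2, 3, 4]
--
--     result = []
--     for i in range(len(lst)):
--         for j in range(i, len(lst)):
--             considered = lst[i:j+1]
--             if all_even(considered):
--                 if len(result) < len(considered):
--                     result = considered
--     return result
-- ===== SOURCE B (Python) =====
-- def get_longest_sublist_all_even(lst):
--     # Scan from the right, keeping the current run of even numbers and the best
--     # run seen so far; '>=' prefers the current (leftmost) run on equal length.
--     best = []
--     run = []
--     for x in reversed(lst):
--         run = [x] + run if x % 2 == 0 else []
--         if len(run) >= len(best):
--             best = run
--     return best
-- ===== Notes on version B (the rewrite author's own statement) =====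
-- stated objective: faster
-- what changed: Replaced the triple-nested enumeration of all slices (each re-checked for evenness) by a single right-to-left pass that maintains the current even run and the best run so far, preferring the current run on ties to keep the leftmost longest run.
import Mathlib
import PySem

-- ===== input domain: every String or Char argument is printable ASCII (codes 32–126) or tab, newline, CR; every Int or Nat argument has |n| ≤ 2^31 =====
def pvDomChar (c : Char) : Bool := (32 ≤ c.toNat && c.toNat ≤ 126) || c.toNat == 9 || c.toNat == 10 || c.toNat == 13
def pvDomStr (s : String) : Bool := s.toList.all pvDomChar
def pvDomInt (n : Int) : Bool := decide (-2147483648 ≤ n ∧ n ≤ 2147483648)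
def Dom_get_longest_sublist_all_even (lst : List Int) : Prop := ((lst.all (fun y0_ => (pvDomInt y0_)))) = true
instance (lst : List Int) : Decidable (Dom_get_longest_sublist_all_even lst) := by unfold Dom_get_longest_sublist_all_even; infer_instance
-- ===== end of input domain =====

-- B replaces A's triple-nested slice enumeration by one right-to-left pass keeping
-- the current even run and the best (leftmost-longest) run; objective: faster.


-- ===== PORT A =====
def all_even : List Int → Bool
  | [] => true
  | x :: xs => if PySem.Int.mod x 2 ≠ 0 then false else all_even xs

def get_longest_sublist_all_even (lst : List Int) : List Int :=
  (PySem.List.pyRange 0 (PySem.List.len lst) 1).foldl (fun result i =>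
    (PySem.List.pyRange i (PySem.List.len lst) 1).foldl (fun result j =>
      let considered := PySem.List.slice lst (some i) (some (j + 1))
      if all_even considered then
        if result.length < considered.length then considered else result
      else result) result) []

-- ===== PORT B =====
def get_longest_sublist_all_even_alt (lst : List Int) : List Int :=
  (lst.reverse.foldl (fun (st : List Int × List Int) x =>
      let run := if PySem.Int.mod x 2 = 0 then x :: st.2 else []
      (if st.1.length ≤ run.length then run else st.1, run)) ([], [])).1

-- ===== PRECONDITION & SPEC =====
def Spec_get_longest_sublist_all_even (lst : List Int) (out : List Int) : Prop := out = get_longest_sublist_all_even_alt lst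
instance (lst : List Int) (out : List Int) : Decidable (Spec_get_longest_sublist_all_even lst out) := by unfold Spec_get_longest_sublist_all_even; infer_instance

-- ===== CLAIM (what is proved, stated in full; the proofs are below) =====
def Claim_equal_get_longest_sublist_all_even : Prop := ∀ (lst : List Int), Dom_get_longest_sublist_all_even lst → Spec_get_longest_sublist_all_even lst (get_longest_sublist_all_even lst)

-- ===== LEMMAS AND PROOFS =====

/-- The maximal all-even prefix of a list. -/
def eprefix : List Int → List Int
  | [] => []
  | x :: xs => if PySem.Int.mod x 2 = 0 then x :: eprefix xs else []

/-- Structural form of B's fold: (best run, current even prefix run). -/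
def go : List Int → List Int × List Int
  | [] => ([], [])
  | x :: xs =>
      let st := go xs
      let run := if PySem.Int.mod x 2 = 0 then x :: st.2 else []
      (if st.1.length ≤ run.length then run else st.1, run)

lemma go_snd (l : List Int) : (go l).2 = eprefix l := by
  induction l with
  | nil => rfl
  | cons x xs ih => simp [go, eprefix, ih]

lemma alt_eq_go (lst : List Int) : get_longest_sublist_all_even_alt lst = (go lst).1 := by
  unfold get_longest_sublist_all_even_alt
  rw [List.foldl_reverse]
  congr 1
  induction lst with
  | nil => rfl
  | cons x xs ih => simp only [List.foldr_cons, ih]; rfl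

lemma eprefix_length_le (l : List Int) : (eprefix l).length ≤ l.length := by
  induction l with
  | nil => simp [eprefix]
  | cons x xs ih =>
      simp only [eprefix]
      split
      · simp; omega
      · simp

lemma eprefix_eq_take (l : List Int) : eprefix l = l.take (eprefix l).length := by
  induction l with
  | nil => rfl
  | cons x xs ih =>
      simp only [eprefix]
      split
      · simp only [List.length_cons, List.take_succ_cons]
        exact congrArg (x :: ·) ih
      · rfl

lemma all_even_take_iff (l : List Int) : ∀ (k : Nat), k ≤ l.length →
    (all_even (l.take k) = true ↔ k ≤ (eprefix l).length) := by
  induction l with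
  | nil =>
      intro k hk
      simp only [List.length_nil, Nat.le_zero] at hk
      subst hk
      simp [all_even, eprefix]
  | cons x xs ih =>
      intro k hk
      cases k with
      | zero => simp [all_even]
      | succ k =>
          simp only [List.take_succ_cons, all_even, eprefix]
          by_cases hx : PySem.Int.mod x 2 = 0
          · simp only [hx]
            simp only [List.length_cons] at hk ⊢
            rw [if_neg (by simp)]
            rw [ih k (by omega)]
            simp
          · rw [if_pos hx, if_neg hx]
            simp

/-- Inner loop of A: for fixed start i, folding over j ∈ [j0, n) either upgrades the
    accumulator to the full even prefix of (lst.drop i) or leaves it unchanged. -/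
lemma inner_fold (lst : List Int) (i : Nat) :
    ∀ (k j : Nat) (r : List Int), i ≤ j → lst.length ≤ j + k →
    (PySem.List.pyRange (j : Int) ((lst.length : Nat) : Int) 1).foldl (fun result jj =>
      let considered := PySem.List.slice lst (some (i : Int)) (some (jj + 1))
      if all_even considered then
        if result.length < considered.length then considered else result
      else result) r
    = (if j - i < (eprefix (lst.drop i)).length ∧ r.length < (eprefix (lst.drop i)).length
        then eprefix (lst.drop i) else r) := by
  intro k
  induction k with
  | zero =>
      intro j r hij hjk
      rw [PySem.List.pyRange_one_eq_nil (by exact_mod_cast hjk)]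
      have he := eprefix_length_le (lst.drop i)
      simp only [List.length_drop] at he
      rw [if_neg (by omega)]
      rfl
  | succ k ih =>
      intro j r hij hjk
      by_cases hjn : lst.length ≤ j
      · rw [PySem.List.pyRange_one_eq_nil (by exact_mod_cast hjn)]
        have he := eprefix_length_le (lst.drop i)
        simp only [List.length_drop] at he
        rw [if_neg (by omega)]
        rfl
      · rw [Nat.not_le] at hjn
        rw [PySem.List.pyRange_one_cons (by exact_mod_cast hjn)]
        rw [List.foldl_cons]
        have hcast : ((j : Int) + 1) = (((j + 1 : Nat) : Nat) : Int) := by push_cast; ring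
        have hslice : PySem.List.slice lst (some (i : Int)) (some ((j : Int) + 1))
            = (lst.drop i).take (j + 1 - i) := by
          rw [hcast, PySem.List.slice_natCast]
        set d := lst.drop i with hd
        have hdlen : d.length = lst.length - i := by simp [hd]
        have he := eprefix_length_le d
        set e := (eprefix d).length with hee
        have hclen : ((d.take (j + 1 - i)).length) = j + 1 - i := by
          simp only [List.length_take]; omega
        have hae : all_even (d.take (j + 1 - i)) = true ↔ j + 1 - i ≤ e :=
          all_even_take_iff d (j + 1 - i) (by omega)
        have step : (PySem.List.pyRange ((j : Int) + 1) ((lst.length : Nat) : Int) 1) =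
            (PySem.List.pyRange (((j + 1 : Nat)) : Int) ((lst.length : Nat) : Int) 1) := by
          push_cast; ring_nf
        simp only [hslice]
        by_cases hall : j + 1 - i ≤ e
        · rw [if_pos (hae.mpr hall)]
          by_cases hr : r.length < (d.take (j + 1 - i)).length
          · rw [if_pos hr]
            rw [step, ih (j + 1) _ (by omega) (by omega)]
            rw [hclen] at hr
            by_cases hlt : j + 1 - i < e
            · rw [if_pos ⟨by omega, by rw [hclen]; omega⟩, if_pos (by omega)]
            · have heq : e = j + 1 - i := by omega
              rw [if_neg (by omega), if_pos (by omega)]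
              rw [← heq, hee]
              exact (eprefix_eq_take d).symm
          · rw [if_neg hr]
            rw [hclen] at hr
            rw [step, ih (j + 1) _ (by omega) (by omega)]
            by_cases hc : j - i < e ∧ r.length < e
            · rw [if_pos ⟨by omega, hc.2⟩, if_pos hc]
            · rw [if_neg (by omega), if_neg hc]
        · rw [if_neg (by simp only [hae]; omega)]
          rw [step, ih (j + 1) _ (by omega) (by omega)]
          by_cases hc : j + 1 - i < e ∧ r.length < e
          · omega
          · rw [if_neg hc, if_neg (by omega)]

/-- Outer loop of A equals "keep the strictly longer of r and the best run of the suffix". -/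
lemma outer_fold (lst : List Int) :
    ∀ (k m : Nat) (r : List Int), lst.length ≤ m + k →
    (PySem.List.pyRange (m : Int) ((lst.length : Nat) : Int) 1).foldl (fun result i =>
      (PySem.List.pyRange i ((lst.length : Nat) : Int) 1).foldl (fun result j =>
        let considered := PySem.List.slice lst (some i) (some (j + 1))
        if all_even considered then
          if result.length < considered.length then considered else result
        else result) result) r
    = (if r.length < ((go (lst.drop m)).1).length then (go (lst.drop m)).1 else r) := by
  intro k
  induction k with
  | zero =>
      intro m r hmk
      rw [PySem.List.pyRange_one_eq_nil (by exact_mod_cast hmk)]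
      rw [List.drop_eq_nil_of_le (by omega)]
      simp [go]
  | succ k ih =>
      intro m r hmk
      by_cases hmn : lst.length ≤ m
      · rw [PySem.List.pyRange_one_eq_nil (by exact_mod_cast hmn)]
        rw [List.drop_eq_nil_of_le (by omega)]
        simp [go]
      · rw [Nat.not_le] at hmn
        rw [PySem.List.pyRange_one_cons (by exact_mod_cast hmn)]
        rw [List.foldl_cons]
        rw [inner_fold lst m (lst.length - m) m r (le_refl m) (by omega)]
        have hstep : (PySem.List.pyRange ((m : Int) + 1) ((lst.length : Nat) : Int) 1) =
            (PySem.List.pyRange (((m + 1 : Nat)) : Int) ((lst.length : Nat) : Int) 1) := by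
          push_cast; ring_nf
        rw [hstep]
        have hdm : lst.drop m = lst[m] :: lst.drop (m + 1) :=
          List.drop_eq_getElem_cons hmn
        have hgo : go (lst.drop m) =
            (let st := go (lst.drop (m + 1))
             let run := if PySem.Int.mod lst[m] 2 = 0 then lst[m] :: st.2 else []
             (if st.1.length ≤ run.length then run else st.1, run)) := by
          rw [hdm]; rfl
        have hep : eprefix (lst.drop m) =
            (if PySem.Int.mod lst[m] 2 = 0 then lst[m] :: eprefix (lst.drop (m + 1)) else []) := by
          rw [hdm]; rfl
        have hrun : (if PySem.Int.mod lst[m] 2 = 0 then lst[m] :: (go (lst.drop (m + 1))).2 else [])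
            = eprefix (lst.drop m) := by
          rw [hep, go_snd]
        set b' := (go (lst.drop (m + 1))).1 with hb'
        set p := eprefix (lst.drop m) with hp
        have hgo1 : (go (lst.drop m)).1 = if b'.length ≤ p.length then p else b' := by
          rw [hgo]; simp only []
          rw [hrun]
        simp only [Nat.sub_self] at *
        by_cases hr : 0 < p.length ∧ r.length < p.length
        · rw [if_pos hr]
          rw [ih (m + 1) p (by omega)]
          rw [← hb']
          rw [hgo1]
          by_cases hbp : b'.length ≤ p.length
          · rw [if_pos hbp, if_neg (by omega), if_pos (by omega)]
          · rw [if_neg hbp, if_pos (by omega), if_pos (by omega)]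
        · rw [if_neg hr]
          rw [ih (m + 1) r (by omega)]
          rw [← hb']
          rw [hgo1]
          by_cases hbp : b'.length ≤ p.length
          · rw [if_pos hbp]
            by_cases hrb : r.length < b'.length
            · omega
            · rw [if_neg hrb, if_neg (by omega)]
          · rw [if_neg hbp]

lemma a_eq_go (lst : List Int) : get_longest_sublist_all_even lst = (go lst).1 := by
  unfold get_longest_sublist_all_even
  have h0 : (0 : Int) = ((0 : Nat) : Int) := rfl
  rw [PySem.List.len_eq, h0]
  rw [outer_fold lst lst.length 0 [] (by omega)]
  simp only [List.drop_zero, List.length_nil]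
  by_cases h : 0 < ((go lst).1).length
  · rw [if_pos h]
  · rw [if_neg h]
    have : ((go lst).1).length = 0 := by omega
    exact (List.length_eq_zero_iff.mp this).symm

-- ===== VERDICT (by name: the statement is the Claim_ definition above) =====
theorem get_longest_sublist_all_even_spec : Claim_equal_get_longest_sublist_all_even := by
  intro lst _
  unfold Spec_get_longest_sublist_all_even
  rw [a_eq_go, alt_eq_go]
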